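-- pv_equiv track=rewrite | github.com/alfredsimkin/neutral_motif_simulator | python_scripts/generate_scaled_mononucleotide_table.py | modify_counts
-- ===== SOURCE A (Python) =====
-- kmer=1
--
-- def check_kmer(kmer_counts, anc_kmer, desc_kmer):
-- 	'''
-- 	configured for 1mers (monomers)
-- 	'''
-- 	if anc_kmer not in kmer_counts:
-- 		kmer_counts[anc_kmer]={'change':0, anc_kmer:0}
-- 	if desc_kmer not in kmer_counts[anc_kmer]:
-- 		kmer_counts[anc_kmer][desc_kmer]=0
-- 	if anc_kmer!=desc_kmer:
-- 		kmer_counts[anc_kmer]['change']+=1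
-- 		kmer_counts[anc_kmer][desc_kmer]+=1
-- 	else:
-- 		kmer_counts[anc_kmer][anc_kmer]+=1
-- 	return kmer_counts
--
-- def modify_counts(kmer_counts, anc_seq, desc_seq):
-- 	anc_seq=anc_seq.upper()
-- 	desc_seq=desc_seq.upper()
-- 	for bp_number, bp in enumerate(anc_seq):
-- 		anc_kmer=anc_seq[bp_number:bp_number+kmer]
-- 		if len(anc_kmer)==kmer:
-- 			desc_kmer=desc_seq[bp_number:bp_number+kmer]
-- 			kmer_counts=check_kmer(kmer_counts, anc_kmer, desc_kmer)
-- 	return kmer_counts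
-- ===== SOURCE B (Python) =====
-- def _bump(inner, anc, desc, n):
--     # pure inner-dict transformer: returns the updated inner dict for `anc`
--     if inner is None:
--         inner = {'change': 0, anc: 0}
--     inner.setdefault(desc, 0)
--     if anc != desc:
--         inner['change'] += n
--     inner[desc] += n          # covers both branches: when anc == desc, desc IS anc
--     return inner
--
-- def modify_counts(kmer_counts, anc_seq, desc_seq):
--     anc_seq = anc_seq.upper()
--     desc_seq = desc_seq.upper()
--     # stage 1: materialise the per-position (anc, desc) 1-mer pairs
--     pairs = [(anc_seq[i:i+1], desc_seq[i:i+1]) for i in range(len(anc_seq))]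
--     # stage 2: count the distinct pairs
--     tallies = {}
--     for p in pairs:
--         tallies[p] = tallies.get(p, 0) + 1
--     # stage 3: one grouped upsert per distinct pair
--     for (anc, desc), n in tallies.items():
--         kmer_counts[anc] = _bump(kmer_counts.get(anc), anc, desc, n)
--     return kmer_counts
-- ===== Notes on version B (the rewrite author's own statement) =====
-- stated objective: alternative
-- what changed: B is staged instead of per-position: it materialises the per-position (anc, desc) pair list, counts the distinct pairs, and then performs one branch-collapsed grouped upsert per distinct pair (inner[desc] += n covers A's else-branch since desc is anc there), instead of A's per-position 4-step check_kmer dict update; Pre_ excludes assoc lists with duplicate keys (impossible for Python dicts) and the inputs where A (and B alike) raise KeyError because a pre-existing ancestral key's inner dict lacks 'change'.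
import Mathlib
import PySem

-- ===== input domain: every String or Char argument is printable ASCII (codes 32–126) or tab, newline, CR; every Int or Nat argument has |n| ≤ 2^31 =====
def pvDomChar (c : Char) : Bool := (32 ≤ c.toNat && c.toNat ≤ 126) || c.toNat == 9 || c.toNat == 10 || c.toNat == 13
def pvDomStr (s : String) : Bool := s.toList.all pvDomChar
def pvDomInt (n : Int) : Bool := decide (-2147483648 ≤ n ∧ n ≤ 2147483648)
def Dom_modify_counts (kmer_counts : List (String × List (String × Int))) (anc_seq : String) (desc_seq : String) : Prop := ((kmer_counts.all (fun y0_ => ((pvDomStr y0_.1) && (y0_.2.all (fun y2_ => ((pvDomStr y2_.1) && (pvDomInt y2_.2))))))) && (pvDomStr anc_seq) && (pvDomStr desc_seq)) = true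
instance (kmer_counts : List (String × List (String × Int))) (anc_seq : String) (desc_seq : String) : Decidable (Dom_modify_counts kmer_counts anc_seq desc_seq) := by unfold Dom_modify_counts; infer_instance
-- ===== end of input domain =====

-- B stages the work — pair list, distinct-pair counts, one branch-collapsed grouped upsert per
-- distinct pair — instead of A's per-position dict update; equivalence is about the return value
-- (both Pythons also mutate the passed-in dict, reaching the same final state).

-- ===== PORT A =====
-- helper: literal port of check_kmer (kmer = 1 throughout the module)
def pvCheckKmer (kc : PySem.Dict String (PySem.Dict String Int)) (anc_kmer desc_kmer : String) :
    PySem.Dict String (PySem.Dict String Int) :=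
  let kc1 := if kc.contains anc_kmer then kc
             else kc.insert anc_kmer ((PySem.Dict.empty.insert "change" (0:Int)).insert anc_kmer 0)
  let kc2 := if (kc1.getD anc_kmer PySem.Dict.empty).contains desc_kmer then kc1
             else kc1.insert anc_kmer ((kc1.getD anc_kmer PySem.Dict.empty).insert desc_kmer 0)
  if anc_kmer ≠ desc_kmer then
    -- kmer_counts[anc_kmer]['change'] += 1 ; += raises KeyError when 'change' is absent (outside Pre_)
    let kc3 := kc2.insert anc_kmer ((kc2.getD anc_kmer PySem.Dict.empty).modify "change" 0 (· + 1))
    kc3.insert anc_kmer ((kc3.getD anc_kmer PySem.Dict.empty).modify desc_kmer 0 (· + 1))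
  else
    kc2.insert anc_kmer ((kc2.getD anc_kmer PySem.Dict.empty).modify anc_kmer 0 (· + 1))

def modify_counts (kmer_counts : List (String × List (String × Int))) (anc_seq : String) (desc_seq : String) : List (String × List (String × Int)) :=
  let ancU := PySem.Str.upper anc_seq
  let descU := PySem.Str.upper desc_seq
  let kc0 : PySem.Dict String (PySem.Dict String Int) :=
    PySem.Dict.mk (kmer_counts.map (fun p => (p.1, PySem.Dict.mk p.2)))
  let res := (PySem.List.enumerate ancU.toList).foldl
    (fun kc ib =>
      let anc_kmer := PySem.Str.slice ancU (some ib.1) (some (ib.1 + 1))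
      if PySem.Str.len anc_kmer = 1 then
        pvCheckKmer kc anc_kmer (PySem.Str.slice descU (some ib.1) (some (ib.1 + 1)))
      else kc) kc0
  res.items.map (fun p => (p.1, p.2.items))

-- ===== PORT B =====
-- helper: port of _bump — pure transformer of the inner dict for one distinct pair seen n times
def pvBump (inner? : Option (PySem.Dict String Int)) (anc desc : String) (n : Int) :
    PySem.Dict String Int :=
  let i0 := match inner? with
    | none => (PySem.Dict.empty.insert "change" (0:Int)).insert anc 0
    | some i => i
  let i1 := if i0.contains desc then i0 else i0.insert desc 0      -- setdefault(desc, 0)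
  let i2 := if anc ≠ desc then i1.modify "change" 0 (· + n) else i1
  i2.modify desc 0 (· + n)                                          -- covers both of A's branches

def modify_counts_alt (kmer_counts : List (String × List (String × Int))) (anc_seq : String) (desc_seq : String) : List (String × List (String × Int)) :=
  let ancU := PySem.Str.upper anc_seq
  let descU := PySem.Str.upper desc_seq
  -- stage 1: the per-position (anc, desc) 1-mer pairs
  let pairs := (PySem.List.pyRange 0 (PySem.Str.len ancU)).map
    (fun i => (PySem.Str.slice ancU (some i) (some (i + 1)),
               PySem.Str.slice descU (some i) (some (i + 1))))
  -- stage 2: count the distinct pairs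
  let tallies := pairs.foldl (fun t p => t.insert p (t.getD p 0 + 1)) PySem.Dict.empty
  -- stage 3: one grouped upsert per distinct pair
  let kc0 : PySem.Dict String (PySem.Dict String Int) :=
    PySem.Dict.mk (kmer_counts.map (fun p => (p.1, PySem.Dict.mk p.2)))
  let res := tallies.items.foldl
    (fun kc q => kc.insert q.1.1 (pvBump (kc.get? q.1.1) q.1.1 q.1.2 q.2)) kc0
  res.items.map (fun p => (p.1, p.2.items))

-- ===== PRECONDITION & SPEC =====
-- Pre_ excludes (i) assoc lists that no Python dict produces (duplicate outer or inner keys) and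
-- (ii) exactly the inputs on which A raises KeyError: some position's upper-cased ancestral 1-mer
-- is a pre-existing key whose inner dict lacks "change" while the descendant 1-mer differs.
def Pre_modify_counts (kmer_counts : List (String × List (String × Int))) (anc_seq : String) (desc_seq : String) : Prop :=
  (kmer_counts.map Prod.fst).Nodup ∧
  (∀ p ∈ kmer_counts, (p.2.map Prod.fst).Nodup) ∧
  ((List.range (PySem.Chars.upper anc_seq.toList).length).all (fun k =>
    kmer_counts.all (fun p =>
      !(p.1 == String.mk (((PySem.Chars.upper anc_seq.toList).drop k).take 1)) ||
      (String.mk (((PySem.Chars.upper anc_seq.toList).drop k).take 1) ==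
       String.mk (((PySem.Chars.upper desc_seq.toList).drop k).take 1)) ||
      (p.2.map Prod.fst).contains "change")) = true)
instance (kmer_counts : List (String × List (String × Int))) (anc_seq : String) (desc_seq : String) : Decidable (Pre_modify_counts kmer_counts anc_seq desc_seq) := by unfold Pre_modify_counts; infer_instance

def pvWitness_modify_counts : (List (String × List (String × Int))) × String × String :=
  ([("A", [("change", 2), ("A", 1)])], "ACgt", "AGg-")

def Spec_modify_counts (kmer_counts : List (String × List (String × Int))) (anc_seq : String) (desc_seq : String) (out : List (String × List (String × Int))) : Prop := out = modify_counts_alt kmer_counts anc_seq desc_seq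
instance (kmer_counts : List (String × List (String × Int))) (anc_seq : String) (desc_seq : String) (out : List (String × List (String × Int))) : Decidable (Spec_modify_counts kmer_counts anc_seq desc_seq out) := by unfold Spec_modify_counts; infer_instance

-- ===== CLAIM (what is proved, stated in full; the proofs are below) =====
def Claim_equal_modify_counts : Prop := ∀ (kmer_counts : List (String × List (String × Int))) (anc_seq : String) (desc_seq : String), Dom_modify_counts kmer_counts anc_seq desc_seq → Pre_modify_counts kmer_counts anc_seq desc_seq → Spec_modify_counts kmer_counts anc_seq desc_seq (modify_counts kmer_counts anc_seq desc_seq)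

-- ===== LEMMAS AND PROOFS =====

-- generic dictionary lemmas ----------------------------------------------------------------

theorem pv_insert_comm {κ ν : Type} [BEq κ] [LawfulBEq κ] (d : PySem.Dict κ ν) (k k' : κ)
    (v w : ν) (h : d.contains k = true) (hne : k' ≠ k) :
    (d.insert k v).insert k' w = (d.insert k' w).insert k v := by
  have hb : (k' == k) = false := beq_eq_false_iff_ne.mpr hne
  have hb' : (k == k') = false := beq_eq_false_iff_ne.mpr (Ne.symm hne)
  apply PySem.Dict.ext
  have h2 : (d.insert k' w).contains k = true := by
    rw [PySem.Dict.contains_insert, h]; simp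
  by_cases hk' : d.contains k' = true
  · have h1 : (d.insert k v).contains k' = true := by
      rw [PySem.Dict.contains_insert, hb, hk']; simp
    rw [PySem.Dict.items_insert (d.insert k v), h1, if_pos rfl,
        PySem.Dict.items_insert d k v, h, if_pos rfl,
        PySem.Dict.items_insert (d.insert k' w), h2, if_pos rfl,
        PySem.Dict.items_insert d k' w, hk', if_pos rfl, List.map_map, List.map_map]
    apply List.map_congr_left
    intro p _
    by_cases hp1 : (p.1 == k) = true
    · have hp2 : (p.1 == k') = false := by
        have hpk : p.1 = k := eq_of_beq hp1
        rw [hpk]; exact hb'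
      simp [Function.comp, hp1, hp2, hb']
    · by_cases hp2 : (p.1 == k') = true
      · simp [Function.comp, hp1, hp2, hb]
      · simp [Function.comp, hp1, hp2]
  · have h1 : (d.insert k v).contains k' = false := by
      rw [PySem.Dict.contains_insert, hb]
      simpa using hk'
    rw [PySem.Dict.items_insert (d.insert k v), h1, if_neg (by simp),
        PySem.Dict.items_insert d k v, h, if_pos rfl,
        PySem.Dict.items_insert (d.insert k' w), h2, if_pos rfl,
        PySem.Dict.items_insert d k' w]
    rw [if_neg (by simp [hk'])]
    rw [List.map_append]
    simp [hb]

theorem pv_modify_merge {κ ν : Type} [BEq κ] [LawfulBEq κ] (d : PySem.Dict κ ν) (k : κ)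
    (c : ν) (f g : ν → ν) :
    (d.modify k c f).modify k c g = d.modify k c (fun x => g (f x)) := by
  unfold PySem.Dict.modify
  rw [PySem.Dict.getD_insert_self, PySem.Dict.insert_insert_self]

theorem pv_modify_comm {κ ν : Type} [BEq κ] [LawfulBEq κ] (d : PySem.Dict κ ν) (k k' : κ)
    (c c' : ν) (f g : ν → ν) (h : d.contains k = true) (hne : k' ≠ k) :
    (d.modify k c f).modify k' c' g = (d.modify k' c' g).modify k c f := by
  unfold PySem.Dict.modify
  have e1 : (d.insert k (f (d.getD k c))).getD k' c' = d.getD k' c' := by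
    unfold PySem.Dict.getD
    rw [PySem.Dict.get?_insert_of_ne _ _ hne]
  have e2 : (d.insert k' (g (d.getD k' c'))).getD k c = d.getD k c := by
    unfold PySem.Dict.getD
    rw [PySem.Dict.get?_insert_of_ne _ _ (Ne.symm hne)]
  rw [e1, e2, pv_insert_comm d k k' _ _ h hne]

theorem pv_modify_insert_comm {κ ν : Type} [BEq κ] [LawfulBEq κ] (d : PySem.Dict κ ν) (k : κ)
    (c : ν) (f : ν → ν) (j : κ) (w : ν) (h : d.contains k = true) (hne : j ≠ k) :
    (d.modify k c f).insert j w = (d.insert j w).modify k c f := by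
  unfold PySem.Dict.modify
  have e2 : (d.insert j w).getD k c = d.getD k c := by
    unfold PySem.Dict.getD
    rw [PySem.Dict.get?_insert_of_ne _ _ (Ne.symm hne)]
  rw [e2, pv_insert_comm d k j _ _ h hne]

theorem pv_contains_modify {κ ν : Type} [BEq κ] [LawfulBEq κ] (d : PySem.Dict κ ν) (k j : κ)
    (c : ν) (f : ν → ν) (h : d.contains k = true) :
    (d.modify j c f).contains k = true := by
  rw [PySem.Dict.contains_modify, h]; simp

theorem pv_contains_modify_self {κ ν : Type} [BEq κ] [LawfulBEq κ] (d : PySem.Dict κ ν) (k : κ)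
    (c : ν) (f : ν → ν) : (d.modify k c f).contains k = true := by
  rw [PySem.Dict.contains_modify]; simp

theorem pv_contains_insert_mono {κ ν : Type} [BEq κ] [LawfulBEq κ] (d : PySem.Dict κ ν) (k j : κ)
    (w : ν) (h : d.contains k = true) : (d.insert j w).contains k = true := by
  rw [PySem.Dict.contains_insert, h]; simp

-- normal forms for the two update helpers --------------------------------------------------

def pvEns (i : PySem.Dict String Int) (d : String) : PySem.Dict String Int :=
  if i.contains d then i else i.insert d 0

def pvAdd (a d : String) (n : Int) (i : PySem.Dict String Int) : PySem.Dict String Int :=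
  if a ≠ d then (i.modify "change" 0 (· + n)).modify d 0 (· + n) else i.modify a 0 (· + n)

def pvSI (a d : String) (n : Int) (o : Option (PySem.Dict String Int)) : PySem.Dict String Int :=
  pvAdd a d n (pvEns (match o with
    | none => (PySem.Dict.empty.insert "change" (0:Int)).insert a 0
    | some i => i) d)

-- proof-side per-pair update; both ports' per-pair steps reduce to it
def pvEmit (kc : PySem.Dict String (PySem.Dict String Int)) (a d : String) (n : Int) :
    PySem.Dict String (PySem.Dict String Int) :=
  kc.insert a (pvSI a d n (kc.get? a))

theorem pv_bump_eq_si (o : Option (PySem.Dict String Int)) (a d : String) (n : Int) :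
    pvBump o a d n = pvSI a d n o := by
  unfold pvBump pvSI pvAdd pvEns
  by_cases had : a ≠ d
  · simp only [if_pos had]
  · have hda : a = d := not_not.mp had
    subst hda
    simp only [if_neg had]

theorem pv_check_eq_emit (kc : PySem.Dict String (PySem.Dict String Int)) (a d : String) :
    pvCheckKmer kc a d = pvEmit kc a d 1 := by
  unfold pvEmit
  cases h : kc.get? a with
  | none =>
    have hc : kc.contains a = false := by rw [PySem.Dict.contains_eq_isSome_get?, h]; rfl
    simp only [pvCheckKmer, pvSI, pvEns, pvAdd, hc, Bool.false_eq_true, if_false,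
      PySem.Dict.getD_insert_self, PySem.Dict.insert_insert_self]
    split_ifs <;>
      (try simp only [PySem.Dict.getD_insert_self, PySem.Dict.insert_insert_self])
  | some i =>
    have hc : kc.contains a = true := by rw [PySem.Dict.contains_eq_isSome_get?, h]; rfl
    have hgd : kc.getD a PySem.Dict.empty = i := by
      unfold PySem.Dict.getD; rw [h]; rfl
    simp only [pvCheckKmer, pvSI, pvEns, pvAdd, hc, if_true, hgd,
      PySem.Dict.getD_insert_self, PySem.Dict.insert_insert_self]
    split_ifs <;>
      (try simp only [hgd, PySem.Dict.getD_insert_self, PySem.Dict.insert_insert_self])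

theorem pv_si_some (a d : String) (n : Int) (i : PySem.Dict String Int)
    (hd : i.contains d = true) : pvSI a d n (some i) = pvAdd a d n i := by
  show pvAdd a d n (pvEns i d) = pvAdd a d n i
  unfold pvEns
  rw [if_pos hd]

-- contains facts for the normal forms ------------------------------------------------------

theorem pv_contains_pvAdd_mono (a d : String) (n : Int) (i : PySem.Dict String Int) (x : String)
    (h : i.contains x = true) : (pvAdd a d n i).contains x = true := by
  unfold pvAdd
  split_ifs
  · exact pv_contains_modify _ _ _ _ _ (pv_contains_modify _ _ _ _ _ h)
  · exact pv_contains_modify _ _ _ _ _ h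

theorem pv_contains_pvEns_mono (i : PySem.Dict String Int) (d x : String)
    (h : i.contains x = true) : (pvEns i d).contains x = true := by
  unfold pvEns
  split_ifs
  · exact h
  · exact pv_contains_insert_mono _ _ _ _ h

theorem pv_contains_pvEns_self (i : PySem.Dict String Int) (d : String) :
    (pvEns i d).contains d = true := by
  unfold pvEns
  split_ifs with h
  · exact h
  · rw [PySem.Dict.contains_insert]; simp

theorem pv_contains_pvSI_mono (a d : String) (n : Int) (i : PySem.Dict String Int) (x : String)
    (h : i.contains x = true) : (pvSI a d n (some i)).contains x = true := by
  unfold pvSI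
  exact pv_contains_pvAdd_mono _ _ _ _ _ (pv_contains_pvEns_mono _ _ _ h)

theorem pv_contains_pvSI_d (a d : String) (n : Int) (o : Option (PySem.Dict String Int)) :
    (pvSI a d n o).contains d = true := by
  unfold pvSI
  exact pv_contains_pvAdd_mono _ _ _ _ _ (pv_contains_pvEns_self _ _)

theorem pv_contains_pvSI_change (a d : String) (n : Int) (o : Option (PySem.Dict String Int))
    (had : a ≠ d) : (pvSI a d n o).contains "change" = true := by
  unfold pvSI pvAdd
  rw [if_pos had]
  exact pv_contains_modify _ _ _ _ _ (pv_contains_modify_self _ _ _ _)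

-- presence of a pair's keys ----------------------------------------------------------------

def pvPres (a d : String) (kc : PySem.Dict String (PySem.Dict String Int)) : Prop :=
  ∃ i, kc.get? a = some i ∧ i.contains d = true ∧ (a ≠ d → i.contains "change" = true)

theorem pv_pres_self (kc : PySem.Dict String (PySem.Dict String Int)) (a d : String) (n : Int) :
    pvPres a d (pvEmit kc a d n) := by
  unfold pvEmit
  exact ⟨_, PySem.Dict.get?_insert_self _ _ _, pv_contains_pvSI_d _ _ _ _,
    fun had => pv_contains_pvSI_change _ _ _ _ had⟩

theorem pv_pres_mono (kc : PySem.Dict String (PySem.Dict String Int)) (a d a' d' : String)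
    (n : Int) (h : pvPres a d kc) : pvPres a d (pvEmit kc a' d' n) := by
  obtain ⟨i, hi, hd, hc⟩ := h
  unfold pvEmit
  by_cases haa : a = a'
  · subst haa
    refine ⟨pvSI a d' n (kc.get? a), PySem.Dict.get?_insert_self _ _ _, ?_, ?_⟩
    · rw [hi]; exact pv_contains_pvSI_mono _ _ _ _ _ hd
    · intro had; rw [hi]; exact pv_contains_pvSI_mono _ _ _ _ _ (hc had)
  · exact ⟨i, by rw [PySem.Dict.get?_insert_of_ne _ _ haa]; exact hi, hd, hc⟩

-- commuting updates ------------------------------------------------------------------------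

theorem pv_add_ne (a d : String) (n : Int) (i : PySem.Dict String Int) (had : a ≠ d) :
    pvAdd a d n i = (i.modify "change" 0 (· + n)).modify d 0 (· + n) := by
  unfold pvAdd; rw [if_pos had]

theorem pv_add_eq (a : String) (n : Int) (i : PySem.Dict String Int) :
    pvAdd a a n i = i.modify a 0 (· + n) := by
  unfold pvAdd; rw [if_neg (by simp)]

theorem pv_add_comm (a d d' : String) (n n' : Int) (i : PySem.Dict String Int)
    (hd : i.contains d = true) (hc : a ≠ d → i.contains "change" = true)
    (hd' : i.contains d' = true) (hdd : d ≠ d') :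
    pvAdd a d n (pvAdd a d' n' i) = pvAdd a d' n' (pvAdd a d n i) := by
  by_cases had : a = d
  · subst had
    rw [pv_add_eq, pv_add_eq, pv_add_ne a d' n' _ hdd, pv_add_ne a d' n' _ hdd]
    by_cases hac : a = "change"
    · subst hac
      rw [pv_modify_comm (PySem.Dict.modify i "change" 0 (· + n')) d' "change" 0 0
            (· + n') (· + n) (pv_contains_modify _ d' "change" _ _ hd') hdd]
      simp only [pv_modify_merge]
      have e : (fun x : Int => x + n' + n) = (fun x : Int => x + n + n') := by funext x; ring
      rw [e]
    · rw [← pv_modify_comm (PySem.Dict.modify i "change" 0 (· + n')) a d' 0 0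
            (· + n) (· + n') (pv_contains_modify _ a "change" _ _ hd) (Ne.symm hdd)]
      rw [← pv_modify_comm i a "change" 0 0 (· + n) (· + n') hd (Ne.symm hac)]
  · by_cases had' : a = d'
    · subst had'
      rw [pv_add_ne a d n _ had, pv_add_ne a d n _ had, pv_add_eq, pv_add_eq]
      by_cases hac : a = "change"
      · subst hac
        rw [pv_modify_comm (PySem.Dict.modify i "change" 0 (· + n)) d "change" 0 0
              (· + n) (· + n') (pv_contains_modify _ d "change" _ _ hd) (Ne.symm hdd)]
        simp only [pv_modify_merge]
        have e : (fun x : Int => x + n' + n) = (fun x : Int => x + n + n') := by funext x; ring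
        rw [e]
      · rw [pv_modify_comm i a "change" 0 0 (· + n') (· + n) hd'
              (fun hh => hac hh.symm)]
        rw [pv_modify_comm (PySem.Dict.modify i "change" 0 (· + n)) a d 0 0
              (· + n') (· + n) (pv_contains_modify _ a "change" _ _ hd') hdd]
    · rw [pv_add_ne a d n _ had, pv_add_ne a d n _ had,
         pv_add_ne a d' n' _ had', pv_add_ne a d' n' _ had']
      have hcc := hc had
      by_cases hdc : d = "change"
      · subst hdc
        simp only [pv_modify_merge]
        rw [pv_modify_comm (PySem.Dict.modify i "change" 0 (· + n')) d' "change" 0 0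
              (· + n') (fun x => x + n + n) (pv_contains_modify _ d' "change" _ _ hd') hdd]
        simp only [pv_modify_merge]
        have e : (fun x : Int => x + n' + n + n) = (fun x : Int => x + n + n + n') := by
          funext x; ring
        rw [e]
      · by_cases hdc' : d' = "change"
        · subst hdc'
          simp only [pv_modify_merge]
          rw [pv_modify_comm (PySem.Dict.modify i "change" 0 (· + n)) d "change" 0 0
                (· + n) (fun x => x + n' + n') (pv_contains_modify _ d "change" _ _ hd)
                (Ne.symm hdd)]
          simp only [pv_modify_merge]
          have e : (fun x : Int => x + n' + n' + n) = (fun x : Int => x + n + n' + n') := by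
            funext x; ring
          rw [e]
        · rw [pv_modify_comm (PySem.Dict.modify i "change" 0 (· + n')) d' "change" 0 0
                (· + n') (· + n) (pv_contains_modify _ d' "change" _ _ hd')
                (fun hh => hdc' hh.symm)]
          simp only [pv_modify_merge]
          rw [pv_modify_comm (PySem.Dict.modify i "change" 0 (fun x => x + n' + n)) d' d 0 0
                (· + n') (· + n) (pv_contains_modify _ d' "change" _ _ hd') hdd]
          rw [pv_modify_comm (PySem.Dict.modify i "change" 0 (· + n)) d "change" 0 0
                (· + n) (· + n') (pv_contains_modify _ d "change" _ _ hd)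
                (fun hh => hdc hh.symm)]
          simp only [pv_modify_merge]
          have e : (fun x : Int => x + n' + n) = (fun x : Int => x + n + n') := by
            funext x; ring
          rw [e]

theorem pv_add_insert_comm (a d : String) (n : Int) (i : PySem.Dict String Int) (j : String)
    (hd : i.contains d = true) (hc : a ≠ d → i.contains "change" = true)
    (hjd : j ≠ d) (hjc : a ≠ d → j ≠ "change") (hja : a = d → j ≠ a) :
    pvAdd a d n (i.insert j 0) = (pvAdd a d n i).insert j 0 := by
  unfold pvAdd
  by_cases had : a ≠ d
  · rw [if_pos had, if_pos had]
    rw [← pv_modify_insert_comm _ "change" _ _ _ _ (hc had) (hjc had)]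
    rw [← pv_modify_insert_comm _ d _ _ _ _ (pv_contains_modify _ _ _ _ _ hd) hjd]
  · rw [if_neg had, if_neg had]
    have hda : a = d := not_not.mp had
    have hia : i.contains a = true := by rw [hda]; exact hd
    rw [← pv_modify_insert_comm _ a _ _ _ _ hia (hja hda)]

theorem pv_inner_comm (a d d' : String) (n n' : Int) (i : PySem.Dict String Int)
    (hd : i.contains d = true) (hc : a ≠ d → i.contains "change" = true) (hdd : d ≠ d') :
    pvSI a d n (some (pvSI a d' n' (some i))) = pvSI a d' n' (some (pvSI a d n (some i))) := by
  rw [pv_si_some a d n _ (pv_contains_pvSI_mono _ _ _ _ _ hd)]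
  rw [pv_si_some a d n i hd]
  unfold pvSI
  by_cases hd' : i.contains d' = true
  · rw [show pvEns i d' = i from if_pos hd']
    rw [show pvEns (pvAdd a d n i) d' = pvAdd a d n i from
      if_pos (pv_contains_pvAdd_mono _ _ _ _ _ hd')]
    exact pv_add_comm a d d' n n' i hd hc hd' hdd
  · -- d' is a fresh inner key
    have hdc' : a ≠ d → d' ≠ "change" := by
      intro had heq
      exact hd' (heq ▸ hc had)
    have hda' : ¬ (a ≠ d) → d' ≠ a := by
      intro had heq
      have : a = d := not_not.mp (by simpa using had)
      exact hdd (heq ▸ this).symm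
    have hens2 : pvEns (pvAdd a d n i) d' = (pvAdd a d n i).insert d' 0 := by
      unfold pvEns
      rw [if_neg]
      intro hcon
      unfold pvAdd at hcon
      by_cases had : a ≠ d
      · rw [if_pos had] at hcon
        rw [PySem.Dict.contains_modify, PySem.Dict.contains_modify] at hcon
        rcases Bool.or_eq_true_iff.mp hcon with h1 | h1
        · exact (Ne.symm hdd) (eq_of_beq h1)
        · rcases Bool.or_eq_true_iff.mp h1 with h2 | h2
          · exact hdc' had (eq_of_beq h2)
          · exact hd' h2
      · rw [if_neg had] at hcon
        rw [PySem.Dict.contains_modify] at hcon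
        rcases Bool.or_eq_true_iff.mp hcon with h1 | h1
        · exact hda' had (eq_of_beq h1)
        · exact hd' h1
    rw [show pvEns i d' = i.insert d' 0 from if_neg (by simp [hd'])]
    rw [hens2]
    rw [← pv_add_insert_comm a d n i d' hd hc (Ne.symm hdd) hdc'
          (fun hda heq => hdd (hda.symm.trans heq.symm))]
    exact pv_add_comm a d d' n n' (i.insert d' 0)
      (pv_contains_insert_mono _ _ _ _ hd)
      (fun had => pv_contains_insert_mono _ _ _ _ (hc had))
      (by rw [PySem.Dict.contains_insert]; simp)
      hdd

theorem pv_comm (kc : PySem.Dict String (PySem.Dict String Int)) (a d a' d' : String)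
    (n n' : Int) (h : pvPres a d kc) (hne : ¬ (a = a' ∧ d = d')) :
    pvEmit (pvEmit kc a' d' n') a d n = pvEmit (pvEmit kc a d n) a' d' n' := by
  obtain ⟨i, hi, hd, hc⟩ := h
  unfold pvEmit
  by_cases haa : a = a'
  · subst haa
    have hdd : d ≠ d' := fun hh => hne ⟨rfl, hh⟩
    rw [PySem.Dict.get?_insert_self, PySem.Dict.get?_insert_self]
    rw [PySem.Dict.insert_insert_self, PySem.Dict.insert_insert_self]
    rw [hi]
    rw [pv_inner_comm a d d' n n' i hd hc hdd]
  · rw [PySem.Dict.get?_insert_of_ne _ _ haa, PySem.Dict.get?_insert_of_ne _ _ (Ne.symm haa)]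
    have hca : kc.contains a = true := by
      rw [PySem.Dict.contains_eq_isSome_get?, hi]; rfl
    exact (pv_insert_comm kc a a' _ _ hca (Ne.symm haa)).symm

-- one emit of n+1 is an emit of n followed by a unit update ---------------------------------

theorem pv_add_add (a d : String) (x : Int) (j : PySem.Dict String Int) :
    pvAdd a d 1 (pvAdd a d x j) = pvAdd a d (x + 1) j := by
  by_cases had : a ≠ d
  · rw [pv_add_ne a d 1 _ had, pv_add_ne a d x _ had, pv_add_ne a d (x+1) _ had]
    by_cases hdc : d = "change"
    · subst hdc
      simp only [pv_modify_merge]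
      have e : (fun y : Int => y + x + x + 1 + 1) = (fun y : Int => y + (x + 1) + (x + 1)) := by
        funext y; ring
      rw [e]
    · rw [← pv_modify_comm (PySem.Dict.modify j "change" 0 (· + x)) "change" d 0 0
            (· + 1) (· + x) (pv_contains_modify_self _ _ _ _) (fun hh => hdc hh)]
      simp only [pv_modify_merge]
      have e : (fun y : Int => y + x + 1) = (fun y : Int => y + (x + 1)) := by
        funext y; ring
      rw [e]
  · have hda : a = d := not_not.mp had
    subst hda
    rw [pv_add_eq, pv_add_eq, pv_add_eq]
    simp only [pv_modify_merge]
    have e : (fun y : Int => y + x + 1) = (fun y : Int => y + (x + 1)) := by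
      funext y; ring
    rw [e]

theorem pv_emit_succ (kc : PySem.Dict String (PySem.Dict String Int)) (a d : String) (x : Int) :
    pvEmit kc a d (x + 1) = pvEmit (pvEmit kc a d x) a d 1 := by
  unfold pvEmit
  rw [PySem.Dict.get?_insert_self, PySem.Dict.insert_insert_self]
  congr 1
  rw [pv_si_some a d 1 _ (pv_contains_pvSI_d _ _ _ _)]
  unfold pvSI
  exact (pv_add_add a d x (pvEns _ d)).symm

def pvStep (kc : PySem.Dict String (PySem.Dict String Int)) (q : String × String) :
    PySem.Dict String (PySem.Dict String Int) := pvEmit kc q.1 q.2 1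

theorem pv_emit_iter (kc : PySem.Dict String (PySem.Dict String Int)) (p : String × String) :
    ∀ (m : Nat), pvEmit kc p.1 p.2 ((m : Int) + 1) =
      (fun kc => pvStep kc p)^[m] (pvStep kc p) := by
  intro m
  induction m generalizing kc with
  | zero => simp [pvStep]
  | succ m ih =>
    have : ((m + 1 : Nat) : Int) + 1 = (((m : Nat) : Int) + 1) + 1 := by push_cast; ring
    rw [this, pv_emit_succ]
    rw [ih]
    rw [Function.iterate_succ_apply']
    rfl

theorem pv_iter_comm (p q : String × String) (hpq : q ≠ p) :
    ∀ (n : Nat) (kc : PySem.Dict String (PySem.Dict String Int)), pvPres p.1 p.2 kc →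
      (fun kc => pvStep kc p)^[n] (pvStep kc q) = pvStep ((fun kc => pvStep kc p)^[n] kc) q := by
  intro n
  induction n with
  | zero => intro kc _; rfl
  | succ n ih =>
    intro kc h
    rw [Function.iterate_succ_apply, Function.iterate_succ_apply]
    have hne : ¬ (p.1 = q.1 ∧ p.2 = q.2) := by
      intro hh
      exact hpq (Prod.ext hh.1.symm hh.2.symm)
    have hco : pvStep (pvStep kc q) p = pvStep (pvStep kc p) q :=
      pv_comm kc p.1 p.2 q.1 q.2 1 1 h hne
    rw [hco]
    exact ih (pvStep kc p) (pv_pres_self kc p.1 p.2 1)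

theorem pv_pull (p : String × String) :
    ∀ (P : List (String × String)) (kc : PySem.Dict String (PySem.Dict String Int)),
      pvPres p.1 p.2 kc →
      P.foldl pvStep kc =
        (P.filter (fun q => !(q == p))).foldl pvStep ((fun kc => pvStep kc p)^[P.count p] kc) := by
  intro P
  induction P with
  | nil => intro kc _; rfl
  | cons q P ih =>
    intro kc h
    by_cases hq : q = p
    · subst hq
      rw [List.foldl_cons]
      rw [ih (pvStep kc q) (pv_pres_self kc q.1 q.2 1)]
      rw [List.filter_cons_of_neg (by simp)]
      rw [List.count_cons_self, Function.iterate_succ_apply]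
    · have hbq : (q == p) = false := beq_eq_false_iff_ne.mpr hq
      rw [List.foldl_cons]
      rw [ih (pvStep kc q) (pv_pres_mono kc p.1 p.2 q.1 q.2 1 h)]
      rw [List.filter_cons_of_pos (by simp [hbq])]
      have hcq : List.count p (q :: P) = List.count p P := by
        rw [List.count_cons]; simp [hbq]
      rw [hcq]
      rw [List.foldl_cons]
      rw [pv_iter_comm p q hq (P.count p) kc h]

-- the tallied, grouped pass equals the per-position pass -----------------------------------

theorem pv_discard_ofList (p : String × String) :
    ∀ (P : List (String × String)),
      PySem.Set.discard (PySem.Set.ofList P) p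
        = PySem.Set.ofList (P.filter (fun q => !(q == p))) := by
  intro P
  induction P with
  | nil => rfl
  | cons x P ih =>
    rw [PySem.Set.ofList_cons]
    by_cases hxp : x = p
    · subst hxp
      show List.filter (fun y => !(y == x)) (x :: PySem.Set.discard (PySem.Set.ofList P) x) = _
      rw [List.filter_cons_of_neg (by simp)]
      rw [List.filter_cons_of_neg (by simp)]
      show List.filter (fun y => !(y == x))
          (List.filter (fun y => !(y == x)) (PySem.Set.ofList P)) = _
      rw [List.filter_filter]
      simp only [Bool.and_self]
      exact ih
    · have hbq : (x == p) = false := beq_eq_false_iff_ne.mpr hxp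
      show List.filter (fun y => !(y == p)) (x :: PySem.Set.discard (PySem.Set.ofList P) x) = _
      rw [List.filter_cons_of_pos (by simp [hbq])]
      rw [List.filter_cons_of_pos (by simp [hbq])]
      rw [PySem.Set.ofList_cons]
      congr 1
      rw [← ih]
      show List.filter (fun y => !(y == p))
          (List.filter (fun y => !(y == x)) (PySem.Set.ofList P))
        = List.filter (fun y => !(y == x))
          (List.filter (fun y => !(y == p)) (PySem.Set.ofList P))
      rw [List.filter_filter, List.filter_filter]
      congr 1
      funext y
      rw [Bool.and_comm]

theorem pv_grouped :
    ∀ (N : Nat) (P : List (String × String)) (kc : PySem.Dict String (PySem.Dict String Int)),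
      P.length ≤ N →
      ((PySem.Set.ofList P).map (fun q => (q, (P.count q : Int)))).foldl
          (fun kc t => pvEmit kc t.1.1 t.1.2 t.2) kc
        = P.foldl pvStep kc := by
  intro N
  induction N with
  | zero =>
    intro P kc hlen
    have hP : P = [] := List.eq_nil_of_length_eq_zero (Nat.le_zero.mp hlen)
    subst hP; rfl
  | succ N ih =>
    intro P kc hlen
    cases P with
    | nil => rfl
    | cons p P =>
      rw [PySem.Set.ofList_cons, pv_discard_ofList]
      simp only [List.map_cons, List.foldl_cons]
      have hmapeq :
          (PySem.Set.ofList (P.filter (fun q => !(q == p)))).map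
              (fun q => (q, ((p :: P).count q : Int)))
            = (PySem.Set.ofList (P.filter (fun q => !(q == p)))).map
              (fun q => (q, ((P.filter (fun q => !(q == p))).count q : Int))) := by
        apply List.map_congr_left
        intro q hqmem
        have hq : q ∈ P.filter (fun q => !(q == p)) := (PySem.Set.mem_ofList _ _).mp hqmem
        have hqp : (q == p) = false := by
          have := List.of_mem_filter hq
          simpa using this
        have hqp' : q ≠ p := beq_eq_false_iff_ne.mp hqp
        have h1 : (p :: P).count q = P.count q := by
          rw [List.count_cons]
          have hpq : (p == q) = false := beq_eq_false_iff_ne.mpr (Ne.symm hqp')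
          simp [hpq]
        have h2 : (P.filter (fun q => !(q == p))).count q = P.count q :=
          List.count_filter (by simp [hqp])
        rw [h1, h2]
      rw [hmapeq]
      have hlen' : (P.filter (fun q => !(q == p))).length ≤ N := by
        have h1 : (P.filter (fun q => !(q == p))).length ≤ P.length :=
          List.length_filter_le _ _
        have h2 : P.length + 1 ≤ N + 1 := by simpa using hlen
        omega
      rw [ih (P.filter (fun q => !(q == p))) _ hlen']
      have hcnt : (((p :: P).count p : Nat) : Int) = ((P.count p : Nat) : Int) + 1 := by
        rw [List.count_cons_self]; push_cast; ring
      rw [hcnt, pv_emit_iter kc p (P.count p)]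
      rw [pv_pull p P (pvStep kc p) (pv_pres_self kc p.1 p.2 1)]

-- reducing the two ports to folds over the common pair list ---------------------------------

def pvPairs (ancU descU : String) : List (String × String) :=
  (PySem.List.pyRange 0 (PySem.Str.len ancU)).map
    (fun i => (PySem.Str.slice ancU (some i) (some (i + 1)),
               PySem.Str.slice descU (some i) (some (i + 1))))

theorem pv_enum_foldl {β : Type} (g : β → Int → β) :
    ∀ (xs : List Char) (s : Int) (init : β),
      (PySem.List.enumerate xs s).foldl (fun acc ib => g acc ib.1) init
        = (PySem.List.pyRange s (s + xs.length)).foldl g init := by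
  intro xs
  induction xs with
  | nil =>
    intro s init
    rw [show PySem.List.enumerate ([] : List Char) s = [] from rfl]
    rw [PySem.List.pyRange_one_eq_nil (by simp)]
    rfl
  | cons x xs ih =>
    intro s init
    rw [PySem.List.enumerate_cons, List.foldl_cons, ih (s + 1) (g init s)]
    have hlt : s < s + ((x :: xs).length : Int) := by
      simp only [List.length_cons]; push_cast; omega
    rw [PySem.List.pyRange_one_cons hlt, List.foldl_cons]
    have harg : (s + 1) + (xs.length : Int) = s + ((x :: xs).length : Int) := by
      simp only [List.length_cons]; push_cast; ring
    rw [harg]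

theorem pv_len_slice_one (s : String) (i : Int) (h0 : 0 ≤ i) (h1 : i < PySem.Str.len s) :
    PySem.Str.len (PySem.Str.slice s (some i) (some (i + 1))) = 1 := by
  obtain ⟨k, rfl⟩ : ∃ k : Nat, i = (k : Int) := ⟨i.toNat, (Int.toNat_of_nonneg h0).symm⟩
  rw [PySem.Str.len_eq] at h1 ⊢
  rw [PySem.Str.toList_slice]
  have hk : k < s.toList.length := by exact_mod_cast h1
  show ((PySem.List.slice s.toList (some (k : Int)) (some ((k : Int) + 1))).length : Int) = 1
  have : ((k : Int) + 1) = ((k + 1 : Nat) : Int) := by push_cast; ring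
  rw [this, PySem.List.length_slice, PySem.List.clampIdx_natCast, PySem.List.clampIdx_natCast]
  have e1 : min k s.toList.length = k := by omega
  have e2 : min (k + 1) s.toList.length = k + 1 := by omega
  rw [e1, e2]
  simp

theorem pv_ports_agree (kmer_counts : List (String × List (String × Int)))
    (anc_seq desc_seq : String) :
    modify_counts kmer_counts anc_seq desc_seq = modify_counts_alt kmer_counts anc_seq desc_seq := by
  simp only [modify_counts, modify_counts_alt]
  set ancU := PySem.Str.upper anc_seq with hancU
  set descU := PySem.Str.upper desc_seq with hdescU
  set kc0 : PySem.Dict String (PySem.Dict String Int) :=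
    PySem.Dict.mk (kmer_counts.map (fun p => (p.1, PySem.Dict.mk p.2))) with hkc0
  have hA : (PySem.List.enumerate ancU.toList).foldl
      (fun kc ib =>
        if PySem.Str.len (PySem.Str.slice ancU (some ib.1) (some (ib.1 + 1))) = 1 then
          pvCheckKmer kc (PySem.Str.slice ancU (some ib.1) (some (ib.1 + 1)))
            (PySem.Str.slice descU (some ib.1) (some (ib.1 + 1)))
        else kc) kc0
      = (pvPairs ancU descU).foldl pvStep kc0 := by
    have h1 := pv_enum_foldl (fun kc i =>
        if PySem.Str.len (PySem.Str.slice ancU (some i) (some (i + 1))) = 1 then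
          pvCheckKmer kc (PySem.Str.slice ancU (some i) (some (i + 1)))
            (PySem.Str.slice descU (some i) (some (i + 1)))
        else kc) ancU.toList 0 kc0
    refine Eq.trans h1 ?_
    have h0 : (0 : Int) + (ancU.toList.length : Int) = PySem.Str.len ancU := by
      rw [PySem.Str.len_eq]; ring
    rw [h0]
    unfold pvPairs
    rw [List.foldl_map]
    apply PySem.List.foldl_congr_mem
    intro acc i hi
    have hmem := PySem.List.mem_pyRange_one.mp hi
    rw [pv_len_slice_one ancU i hmem.1 hmem.2]
    rw [if_pos rfl]
    rw [pv_check_eq_emit]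
    rfl
  have hE : (fun (kc : PySem.Dict String (PySem.Dict String Int)) (q : (String × String) × Int) =>
        kc.insert q.1.1 (pvBump (kc.get? q.1.1) q.1.1 q.1.2 q.2))
      = (fun kc q => pvEmit kc q.1.1 q.1.2 q.2) := by
    funext kc q
    rw [pv_bump_eq_si]
    rfl
  have hT : ((PySem.List.pyRange 0 (PySem.Str.len ancU)).map
      (fun i => (PySem.Str.slice ancU (some i) (some (i + 1)),
                 PySem.Str.slice descU (some i) (some (i + 1))))).foldl
      (fun t p => t.insert p (t.getD p 0 + 1)) PySem.Dict.empty
      = PySem.Dict.counter (pvPairs ancU descU) :=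
    PySem.Dict.foldl_insert_getD_add_one_eq_counter _
  rw [hA, hE, hT, PySem.Dict.items_counter]
  rw [pv_grouped (pvPairs ancU descU).length (pvPairs ancU descU) kc0 le_rfl]

-- ===== VERDICT (by name: the statement is the Claim_ definition above) =====
theorem modify_counts_spec : Claim_equal_modify_counts := by
  intro kmer_counts anc_seq desc_seq _hdom _hpre
  unfold Spec_modify_counts
  exact pv_ports_agree kmer_counts anc_seq desc_seq
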